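-- pv_equiv track=rewrite | github.com/wangqi1996/inter-nat | inter_nat/dependency.py | word_index_to_bpe
-- ===== SOURCE A (Python) =====
-- def word_index_to_bpe(bpe_text):
--
--     word_index = 0
--     mapping = {0: [0], }  # word_index: bpe_index
--     for token_index, token in enumerate(bpe_text):
--         if token_index == 0:
--             continue
--         if bpe_text[token_index - 1][-2:] == "@@":
--             mapping[word_index].append(token_index)
--         else:
--             word_index += 1
--             mapping[word_index] = [token_index]
--     return mapping
-- ===== SOURCE B (Python) =====
-- def word_index_to_bpe(bpe_text):
--     n = len(bpe_text)
--     starts = [i for i in range(n) if i == 0 or bpe_text[i - 1][-2:] != "@@"]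
--     return {w: list(range(s, e))
--             for w, (s, e) in enumerate(zip(starts, starts[1:] + [n]))}
-- ===== Notes on version B (the rewrite author's own statement) =====
-- stated objective: alternative
-- what changed: Replaces the stateful loop that mutates a dict entry per token with a two-phase construction: first collect the word-start positions, then emit each word's bpe indices as a contiguous range between consecutive starts.
-- intended difference: On the empty token list A returns its initialization artefact {0: [0]} (claiming a bpe index 0 that does not exist); B returns the empty mapping {}, which is the intended image of an empty sentence. — e.g. on word_index_to_bpe([]): A returns [(0, [0])], B returns []
import Mathlib
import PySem

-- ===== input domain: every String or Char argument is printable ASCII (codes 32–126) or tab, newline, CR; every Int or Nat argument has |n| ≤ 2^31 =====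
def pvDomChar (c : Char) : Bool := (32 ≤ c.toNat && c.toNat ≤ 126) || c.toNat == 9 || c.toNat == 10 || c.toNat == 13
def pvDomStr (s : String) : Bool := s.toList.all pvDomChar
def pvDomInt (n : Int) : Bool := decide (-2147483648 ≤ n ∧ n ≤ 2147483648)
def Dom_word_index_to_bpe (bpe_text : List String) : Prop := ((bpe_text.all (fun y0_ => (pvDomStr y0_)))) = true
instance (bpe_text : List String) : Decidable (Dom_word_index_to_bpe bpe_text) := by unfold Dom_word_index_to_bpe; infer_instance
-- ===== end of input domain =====

-- B replaces A's stateful dict-mutating loop by a two-phase construction (collect the word-start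
-- positions, then emit each word's contiguous index range between consecutive starts); equal on
-- all non-empty inputs; on the empty list B returns {} where A returns its init artefact {0:[0]}.

-- ===== PORT A =====
def word_index_to_bpe (bpe_text : List String) : List (Int × List Int) :=
  (((PySem.List.enumerate bpe_text).foldl
    (fun (st : Int × PySem.Dict Int (List Int)) (p : Int × String) =>
      if p.1 == 0 then st
      else if PySem.Str.slice ((PySem.List.pyGet? bpe_text (p.1 - 1)).getD "") (some (-2)) none == "@@" then
        (st.1, st.2.modify st.1 [] (fun v => v ++ [p.1]))
      else
        (st.1 + 1, st.2.insert (st.1 + 1) [p.1]))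
    (0, PySem.Dict.ofList [(0, [0])])).2).items

-- ===== PORT B =====
-- the word-start positions: index 0 and every i whose predecessor token does not end in "@@"
def pvStarts (bpe_text : List String) : List Int :=
  (PySem.List.pyRange 0 bpe_text.length).filter
    (fun i => i == 0 || !(PySem.Str.slice ((PySem.List.pyGet? bpe_text (i - 1)).getD "") (some (-2)) none == "@@"))

def word_index_to_bpe_alt (bpe_text : List String) : List (Int × List Int) :=
  (PySem.List.enumerate ((pvStarts bpe_text).zip ((pvStarts bpe_text).drop 1 ++ [(bpe_text.length : Int)]))).map
    (fun p => (p.1, PySem.List.pyRange p.2.1 p.2.2))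

-- ===== PRECONDITION & SPEC =====
-- On the empty token list A returns its initialization artefact {0: [0]} (claiming a bpe index 0
-- that does not exist); B returns the empty mapping {}, the intended image of an empty sentence.
def D_word_index_to_bpe (bpe_text : List String) : Prop := bpe_text = []
instance (bpe_text : List String) : Decidable (D_word_index_to_bpe bpe_text) := by unfold D_word_index_to_bpe; infer_instance

def Spec_word_index_to_bpe (bpe_text : List String) (out : List (Int × List Int)) : Prop := ¬ D_word_index_to_bpe bpe_text → out = word_index_to_bpe_alt bpe_text
instance (bpe_text : List String) (out : List (Int × List Int)) : Decidable (Spec_word_index_to_bpe bpe_text out) := by unfold Spec_word_index_to_bpe; infer_instance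

def pvDiffWitness_word_index_to_bpe : List String := []
def pvDiffWitnessOut_word_index_to_bpe : (List (Int × List Int)) × (List (Int × List Int)) := ([(0, [0])], [])

-- ===== CLAIM (what is proved, stated in full; the proofs are below) =====
def Claim_unchanged_word_index_to_bpe : Prop := ∀ (bpe_text : List String), Dom_word_index_to_bpe bpe_text → Spec_word_index_to_bpe bpe_text (word_index_to_bpe bpe_text)
def Claim_changed_word_index_to_bpe : Prop := Dom_word_index_to_bpe (pvDiffWitness_word_index_to_bpe) ∧ D_word_index_to_bpe (pvDiffWitness_word_index_to_bpe) ∧ word_index_to_bpe (pvDiffWitness_word_index_to_bpe) = pvDiffWitnessOut_word_index_to_bpe.1 ∧ word_index_to_bpe_alt (pvDiffWitness_word_index_to_bpe) = pvDiffWitnessOut_word_index_to_bpe.2 ∧ pvDiffWitnessOut_word_index_to_bpe.1 ≠ pvDiffWitnessOut_word_index_to_bpe.2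
def Claim_exact_word_index_to_bpe : Prop := ∀ (bpe_text : List String), Dom_word_index_to_bpe bpe_text → D_word_index_to_bpe bpe_text → word_index_to_bpe bpe_text ≠ word_index_to_bpe_alt bpe_text

-- ===== LEMMAS AND PROOFS =====

-- the boundary test both programs perform at token index i
def pvEnds (bpe : List String) (i : Int) : Bool :=
  PySem.Str.slice ((PySem.List.pyGet? bpe (i - 1)).getD "") (some (-2)) none == "@@"

-- one iteration of A's loop body (token indices ≥ 1), abstracted over the boundary test
def pvStep (c : Int → Bool) (st : Int × PySem.Dict Int (List Int)) (i : Int) :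
    Int × PySem.Dict Int (List Int) :=
  if c i then (st.1, st.2.modify st.1 [] (fun v => v ++ [i]))
  else (st.1 + 1, st.2.insert (st.1 + 1) [i])

-- the same loop on (finished groups, current group) instead of a dict
def pvGrp (c : Int → Bool) (st : List (List Int) × List Int) (i : Int) :
    List (List Int) × List Int :=
  if c i then (st.1, st.2 ++ [i]) else (st.1 ++ [st.2], [i])

-- the groups as index ranges between consecutive boundaries
def pvRanges (s : Int) (bs : List Int) (n : Int) : List (List Int) :=
  match bs with
  | [] => [PySem.List.pyRange s n]
  | b :: bs' => PySem.List.pyRange s b :: pvRanges b bs' n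

def pvMergeHead (g : List Int) : List (List Int) → List (List Int)
  | [] => [g]
  | h :: t => (g ++ h) :: t

lemma pv_enum_cons {α : Type} (x : α) (xs : List α) (k : Int) :
    PySem.List.enumerate (x :: xs) k = (k, x) :: PySem.List.enumerate xs (k + 1) := rfl

lemma pv_enum_append_singleton {α : Type} (l : List α) (x : α) (k : Int) :
    PySem.List.enumerate (l ++ [x]) k = PySem.List.enumerate l k ++ [(k + l.length, x)] := by
  induction l generalizing k with
  | nil => simp [PySem.List.enumerate]
  | cons y ys ih => simp [ih (k + 1)]; omega

lemma pv_foldl_enum_range {α β : Type} (l : List α) (k : Int) (F : β → Int × α → β) (G : β → Int → β)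
    (h : ∀ st i x, F st (i, x) = G st i) (st : β) :
    (PySem.List.enumerate l k).foldl F st = (PySem.List.pyRange k (k + l.length)).foldl G st := by
  induction l generalizing k st with
  | nil => simp [PySem.List.enumerate, PySem.List.pyRange]
  | cons x xs ih =>
      rw [show PySem.List.enumerate (x :: xs) k = (k, x) :: PySem.List.enumerate xs (k + 1) from rfl]
      rw [PySem.List.pyRange_one_cons (by simp)]
      simp only [List.foldl_cons, h]
      rw [ih, show k + 1 + (xs.length : Int) = k + ((x :: xs).length : Int) by simp; omega]

lemma pv_map_enum {α β : Type} (f : α → β) (l : List α) (k : Int) :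
    (PySem.List.enumerate l k).map (fun p => (p.1, f p.2)) = PySem.List.enumerate (l.map f) k := by
  induction l generalizing k with
  | nil => rfl
  | cons x xs ih => simpa [PySem.List.enumerate] using ih (k + 1)

lemma pv_find_last (done : List (List Int)) (cur : List Int) (k : Int) :
    (PySem.List.enumerate (done ++ [cur]) k).find? (fun p => p.1 == k + done.length)
      = some (k + done.length, cur) := by
  induction done generalizing k with
  | nil => simp [PySem.List.enumerate]
  | cons d done ih =>
      rw [List.cons_append, pv_enum_cons, List.find?_cons]
      have hne : ((k : Int) == k + ((d :: done).length : Int)) = false := by simp; omega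
      rw [hne]
      have key : k + ((d :: done).length : Int) = (k + 1) + (done.length : Int) := by simp; omega
      rw [key, ih (k + 1)]

lemma pv_any_fresh (gs : List (List Int)) (k : Int) :
    ((PySem.List.enumerate gs k).any fun p => p.1 == k + gs.length) = false := by
  induction gs generalizing k with
  | nil => simp [PySem.List.enumerate]
  | cons g gs ih =>
      rw [pv_enum_cons, List.any_cons]
      have key : k + ((g :: gs).length : Int) = (k + 1) + (gs.length : Int) := by simp; omega
      rw [key, ih (k + 1)]
      simp; omega

lemma pv_map_replace (done : List (List Int)) (cur v : List Int) (k : Int) :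
    (PySem.List.enumerate (done ++ [cur]) k).map
        (fun p => if p.1 == k + done.length then (k + done.length, v) else p)
      = PySem.List.enumerate (done ++ [v]) k := by
  induction done generalizing k with
  | nil => simp [PySem.List.enumerate]
  | cons d done ih =>
      rw [List.cons_append, pv_enum_cons, List.map_cons]
      have hne : ((k : Int) == k + ((d :: done).length : Int)) = false := by simp; omega
      have key : k + ((d :: done).length : Int) = (k + 1) + (done.length : Int) := by simp; omega
      rw [hne, key, ih (k + 1), List.cons_append, pv_enum_cons]
      simp

lemma pv_modify_last (done : List (List Int)) (cur : List Int) (k i : Int) :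
    (PySem.Dict.mk (PySem.List.enumerate (done ++ [cur]) k)).modify (k + done.length) [] (fun v => v ++ [i])
      = PySem.Dict.mk (PySem.List.enumerate (done ++ [cur ++ [i]]) k) := by
  have hf := pv_find_last done cur k
  have hcontains : (PySem.Dict.mk (PySem.List.enumerate (done ++ [cur]) k)).contains (k + done.length) = true := by
    simp only [PySem.Dict.contains]
    have hmem := List.mem_of_find?_eq_some hf
    have hp := List.find?_some hf
    exact List.any_eq_true.2 ⟨_, hmem, hp⟩
  simp only [PySem.Dict.modify, PySem.Dict.getD, PySem.Dict.get?, PySem.Dict.insert, hcontains,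
    if_true, hf, Option.map_some, Option.getD_some]
  exact congrArg PySem.Dict.mk (pv_map_replace done cur (cur ++ [i]) k)

lemma pv_insert_fresh (gs : List (List Int)) (k : Int) (v : List Int) :
    (PySem.Dict.mk (PySem.List.enumerate gs k)).insert (k + gs.length) v
      = PySem.Dict.mk (PySem.List.enumerate (gs ++ [v]) k) := by
  have hc : (PySem.Dict.mk (PySem.List.enumerate gs k)).contains (k + gs.length) = false := by
    simp only [PySem.Dict.contains]; exact pv_any_fresh gs k
  simp only [PySem.Dict.insert, hc, Bool.false_eq_true, if_false]
  exact congrArg PySem.Dict.mk (pv_enum_append_singleton gs v k).symm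

lemma pv_range_self (j : Int) : PySem.List.pyRange j j = [] := by
  simp [PySem.List.pyRange]

-- A's loop, started on the dict holding groups done ++ [cur], tracks pvGrp
lemma pv_M (c : Int → Bool) : ∀ (is : List Int) (done : List (List Int)) (cur : List Int) (k : Int),
    is.foldl (pvStep c) (k + done.length, PySem.Dict.mk (PySem.List.enumerate (done ++ [cur]) k))
      = (k + ((is.foldl (pvGrp c) (done, cur)).1.length : Int),
         PySem.Dict.mk (PySem.List.enumerate ((is.foldl (pvGrp c) (done, cur)).1 ++ [(is.foldl (pvGrp c) (done, cur)).2]) k)) := by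
  intro is
  induction is with
  | nil => intro done cur k; simp
  | cons i is ih =>
      intro done cur k
      simp only [List.foldl_cons]
      by_cases hc : c i
      · have hstep : pvStep c (k + (done.length : Int), PySem.Dict.mk (PySem.List.enumerate (done ++ [cur]) k)) i
            = (k + (done.length : Int), PySem.Dict.mk (PySem.List.enumerate (done ++ [cur ++ [i]]) k)) := by
          simp only [pvStep, hc, if_true]
          rw [pv_modify_last]
        have hgrp : pvGrp c (done, cur) i = (done, cur ++ [i]) := by simp [pvGrp, hc]
        rw [hstep, hgrp, ih done (cur ++ [i]) k]
      · have key : k + (done.length : Int) + 1 = k + (((done ++ [cur]).length : Nat) : Int) := by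
          simp; omega
        have hstep : pvStep c (k + (done.length : Int), PySem.Dict.mk (PySem.List.enumerate (done ++ [cur]) k)) i
            = (k + (((done ++ [cur]).length : Nat) : Int), PySem.Dict.mk (PySem.List.enumerate ((done ++ [cur]) ++ [[i]]) k)) := by
          simp only [pvStep, hc, if_false, Bool.false_eq_true]
          rw [key, pv_insert_fresh]
        have hgrp : pvGrp c (done, cur) i = (done ++ [cur], [i]) := by simp [pvGrp, hc]
        rw [hstep, hgrp, ih (done ++ [cur]) [i] k]

lemma pv_merge_cons (j n : Int) (bs : List Int) (hj : j < n) (hb : ∀ b ∈ bs, j < b) :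
    pvMergeHead [j] (pvRanges (j + 1) bs n) = pvRanges j bs n := by
  cases bs with
  | nil =>
      simp only [pvRanges, pvMergeHead]
      rw [PySem.List.pyRange_one_cons hj]
      rfl
  | cons b bs' =>
      simp only [pvRanges, pvMergeHead]
      rw [PySem.List.pyRange_one_cons (hb b (by simp))]
      rfl

lemma pv_merge_snoc (cur : List Int) (j n : Int) (bs : List Int) (hj : j < n) (hb : ∀ b ∈ bs, j < b) :
    pvMergeHead (cur ++ [j]) (pvRanges (j + 1) bs n) = pvMergeHead cur (pvRanges j bs n) := by
  cases bs with
  | nil =>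
      simp only [pvRanges, pvMergeHead]
      rw [PySem.List.pyRange_one_cons hj]
      simp
  | cons b bs' =>
      simp only [pvRanges, pvMergeHead]
      rw [PySem.List.pyRange_one_cons (hb b (by simp))]
      simp

-- the grouping loop produces exactly the ranges between consecutive boundaries
lemma pv_L (c : Int → Bool) : ∀ (fuel : Nat) (j n : Int), (n - j).toNat = fuel → j ≤ n →
    ∀ (done : List (List Int)) (cur : List Int),
    ((PySem.List.pyRange j n).foldl (pvGrp c) (done, cur)).1
        ++ [((PySem.List.pyRange j n).foldl (pvGrp c) (done, cur)).2]
      = done ++ pvMergeHead cur (pvRanges j ((PySem.List.pyRange j n).filter (fun i => !(c i))) n) := by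
  intro fuel
  induction fuel with
  | zero =>
      intro j n hf hj done cur
      have : j = n := by omega
      subst this
      simp [pvRanges, pvMergeHead]
  | succ f ih =>
      intro j n hf hj done cur
      have hjn : j < n := by omega
      rw [PySem.List.pyRange_one_cons hjn]
      simp only [List.foldl_cons, List.filter_cons]
      have hmem : ∀ b ∈ (PySem.List.pyRange (j + 1) n).filter (fun i => !(c i)), j < b := by
        intro b hbmem
        have := (PySem.List.mem_pyRange_one).1 (List.mem_of_mem_filter hbmem)
        omega
      by_cases hc : c j
      · have : (!(c j)) = false := by simp [hc]
        rw [this]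
        simp only [Bool.false_eq_true, if_false]
        have hg : pvGrp c (done, cur) j = (done, cur ++ [j]) := by simp [pvGrp, hc]
        rw [hg, ih (j + 1) n (by omega) (by omega) done (cur ++ [j]),
            pv_merge_snoc cur j n _ hjn hmem]
      · have : (!(c j)) = true := by simp [hc]
        rw [this]
        simp only [if_true]
        have hg : pvGrp c (done, cur) j = (done ++ [cur], [j]) := by simp [pvGrp, hc]
        rw [hg, ih (j + 1) n (by omega) (by omega) (done ++ [cur]) [j],
            pv_merge_cons j n _ hjn hmem]
        simp only [pvRanges, pv_range_self, pvMergeHead, List.append_assoc]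
        cases hbs : (PySem.List.pyRange (j + 1) n).filter (fun i => !(c i)) with
        | nil => simp [pvRanges]
        | cons b bs' => simp [pvRanges]

lemma pv_zip_ranges : ∀ (bs : List Int) (s n : Int),
    ((s :: bs).zip (bs ++ [n])).map (fun q => PySem.List.pyRange q.1 q.2) = pvRanges s bs n := by
  intro bs
  induction bs with
  | nil => intro s n; simp [pvRanges]
  | cons b bs' ih =>
      intro s n
      rw [List.cons_append, List.zip_cons_cons, List.map_cons, pvRanges, ih b n]

-- A's result for a non-empty input, as enumerated boundary ranges
lemma pv_A_eq (bpe : List String) (h : bpe ≠ []) :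
    word_index_to_bpe bpe
      = PySem.List.enumerate
          (pvMergeHead [0]
            (pvRanges 1 ((PySem.List.pyRange 1 bpe.length).filter (fun i => !(pvEnds bpe i))) bpe.length)) 0 := by
  have hn : (0 : Int) < bpe.length := by
    have := List.length_pos_iff.2 h
    exact_mod_cast this
  unfold word_index_to_bpe
  rw [pv_foldl_enum_range bpe 0
      (fun (st : Int × PySem.Dict Int (List Int)) (p : Int × String) =>
        if p.1 == 0 then st
        else if PySem.Str.slice ((PySem.List.pyGet? bpe (p.1 - 1)).getD "") (some (-2)) none == "@@" then
          (st.1, st.2.modify st.1 [] (fun v => v ++ [p.1]))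
        else
          (st.1 + 1, st.2.insert (st.1 + 1) [p.1]))
      (fun st i => if i == 0 then st else pvStep (pvEnds bpe) st i)
      (fun st i x => rfl)]
  rw [zero_add, PySem.List.pyRange_one_cons hn, List.foldl_cons]
  rw [show (if ((0 : Int) == 0) = true then ((0 : Int), PySem.Dict.ofList [((0 : Int), [(0 : Int)])])
        else pvStep (pvEnds bpe) (0, PySem.Dict.ofList [(0, [0])]) 0)
      = (0, PySem.Dict.ofList [(0, [0])]) by simp]
  rw [PySem.List.foldl_congr_mem _ _ (pvStep (pvEnds bpe)) _
      (by
        intro st i hi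
        have h1 := (PySem.List.mem_pyRange_one).1 hi
        have : ((i : Int) == 0) = false := by simp; omega
        rw [this]
        simp)]
  have hM := pv_M (pvEnds bpe) (PySem.List.pyRange 1 bpe.length) [] [0] 0
  norm_num at hM
  rw [show PySem.Dict.ofList [((0 : Int), [(0 : Int)])]
      = PySem.Dict.mk [((0 : Int), [(0 : Int)])] from rfl]
  rw [show ((0 : Int) + 1) = 1 by norm_num]
  rw [hM]
  have hL := pv_L (pvEnds bpe) (((bpe.length : Int) - 1).toNat) 1 bpe.length rfl (by omega) [] [0]
  simp only [List.nil_append] at hL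
  exact congrArg (fun gs => PySem.List.enumerate gs 0) hL

-- B's result for a non-empty input, as the same enumerated ranges
lemma pv_B_eq (bpe : List String) (h : bpe ≠ []) :
    word_index_to_bpe_alt bpe
      = PySem.List.enumerate
          (pvRanges 0 ((PySem.List.pyRange 1 bpe.length).filter (fun i => !(pvEnds bpe i))) bpe.length) 0 := by
  have hn : (0 : Int) < bpe.length := by
    have := List.length_pos_iff.2 h
    exact_mod_cast this
  unfold word_index_to_bpe_alt pvStarts
  rw [show (fun (i : Int) => i == 0 || !(PySem.Str.slice ((PySem.List.pyGet? bpe (i - 1)).getD "") (some (-2)) none == "@@"))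
      = (fun i => i == 0 || !(pvEnds bpe i)) from rfl]
  rw [PySem.List.pyRange_one_cons hn, List.filter_cons]
  have hcond : ((0 : Int) == 0 || !(pvEnds bpe 0)) = true := by simp
  rw [if_pos hcond]
  have hfc : List.filter (fun i => i == 0 || !(pvEnds bpe i)) (PySem.List.pyRange (0 + 1) (bpe.length : Int))
      = List.filter (fun i => !(pvEnds bpe i)) (PySem.List.pyRange 1 (bpe.length : Int)) := by
    rw [show ((0 : Int) + 1) = 1 by norm_num]
    refine List.filter_congr ?_
    intro i hi
    have h1 := (PySem.List.mem_pyRange_one).1 hi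
    have : ((i : Int) == 0) = false := by simp; omega
    simp [this]
  rw [hfc]
  rw [show List.drop 1 ((0 : Int) :: List.filter (fun i => !(pvEnds bpe i)) (PySem.List.pyRange 1 (bpe.length : Int)))
      = List.filter (fun i => !(pvEnds bpe i)) (PySem.List.pyRange 1 (bpe.length : Int)) from rfl]
  rw [pv_map_enum (fun q : Int × Int => PySem.List.pyRange q.1 q.2) _ 0]
  rw [pv_zip_ranges]

-- ===== VERDICT (by name: the statement is the Claim_ definition above) =====
theorem word_index_to_bpe_spec : Claim_unchanged_word_index_to_bpe := by
  intro bpe _hdom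
  unfold Spec_word_index_to_bpe
  intro hD
  have h : bpe ≠ [] := hD
  have hn : (0 : Int) < bpe.length := by
    have := List.length_pos_iff.2 h
    exact_mod_cast this
  rw [pv_A_eq bpe h, pv_B_eq bpe h]
  have hmem : ∀ b ∈ (PySem.List.pyRange 1 (bpe.length : Int)).filter (fun i => !(pvEnds bpe i)), (0 : Int) < b := by
    intro b hbmem
    have := (PySem.List.mem_pyRange_one).1 (List.mem_of_mem_filter hbmem)
    omega
  have hmc := pv_merge_cons 0 bpe.length
      ((PySem.List.pyRange 1 (bpe.length : Int)).filter (fun i => !(pvEnds bpe i))) hn hmem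
  rw [show ((0 : Int) + 1) = 1 by norm_num] at hmc
  rw [hmc]

theorem word_index_to_bpe_changed : Claim_changed_word_index_to_bpe := by
  unfold Claim_changed_word_index_to_bpe; decide

theorem word_index_to_bpe_tight : Claim_exact_word_index_to_bpe := by
  intro bpe _ hD
  subst hD
  decide
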